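-- pv_equiv track=rewrite | github.com/magnusbakken/adventofcode2023 | day13.py | parse
-- ===== SOURCE A (Python) =====
-- def parse(lines):
--     blocks = []
--     current = []
--     for line in lines:
--         if len(line) == 0:
--             blocks.append(current)
--             current = []
--         else:
--             current.append([c for c in line])
--     blocks.append(current)
--     return blocks
-- ===== SOURCE B (Python) =====
-- def parse(lines):
--     blocks = []
--     start = 0
--     for idx, line in enumerate(lines):
--         if line == '':
--             blocks.append([list(l) for l in lines[start:idx]])
--             start = idx + 1
--     blocks.append([list(l) for l in lines[start:]])
--     return blocks
-- ===== Notes on version B (the rewrite author's own statement) =====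
-- stated objective: alternative
-- what changed: Instead of growing the current block row by row and flushing it at each blank line, B keeps only a start cursor and, at each blank line found via enumerate, emits the whole block as a slice lines[start:idx] converted to char lists, plus a final lines[start:] block.
import Mathlib
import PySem

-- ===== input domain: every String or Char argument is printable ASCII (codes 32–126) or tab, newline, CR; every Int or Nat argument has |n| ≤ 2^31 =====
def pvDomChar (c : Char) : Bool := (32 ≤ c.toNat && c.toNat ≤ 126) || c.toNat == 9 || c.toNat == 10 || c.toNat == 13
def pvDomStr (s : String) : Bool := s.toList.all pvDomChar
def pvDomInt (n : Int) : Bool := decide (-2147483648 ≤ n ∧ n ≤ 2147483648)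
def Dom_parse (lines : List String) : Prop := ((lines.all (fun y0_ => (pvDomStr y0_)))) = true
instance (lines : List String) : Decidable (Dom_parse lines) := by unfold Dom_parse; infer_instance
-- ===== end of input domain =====

-- B replaces A's incremental current-block accumulator with a one-pass cursor over enumerate(lines)
-- that emits whole slices lines[start:idx] at each blank line (objective: alternative decomposition, same cost).


-- [c for c in line] : the line's characters as one-character strings
def pvCharify (s : String) : List String := s.toList.map (fun c => String.ofList [c])

-- ===== PORT A =====
def stepA (st : List (List (List String)) × List (List String)) (line : String) :
    List (List (List String)) × List (List String) :=
  if PySem.Str.len line == 0 then (st.1 ++ [st.2], []) else (st.1, st.2 ++ [pvCharify line])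

def parse (lines : List String) : List (List (List String)) :=
  let r := lines.foldl stepA ([], [])
  r.1 ++ [r.2]

-- ===== PORT B =====
def stepB (lines : List String) (st : List (List (List String)) × Int) (p : Int × String) :
    List (List (List String)) × Int :=
  if p.2 == "" then
    (st.1 ++ [(PySem.List.slice lines (some st.2) (some p.1)).map pvCharify], p.1 + 1)
  else st

def parse_alt (lines : List String) : List (List (List String)) :=
  let r := (PySem.List.enumerate lines 0).foldl (stepB lines) ([], 0)
  r.1 ++ [(PySem.List.slice lines (some r.2) none).map pvCharify]

-- ===== PRECONDITION & SPEC =====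
def Spec_parse (lines : List String) (out : List (List (List String))) : Prop := out = parse_alt lines
instance (lines : List String) (out : List (List (List String))) : Decidable (Spec_parse lines out) := by unfold Spec_parse; infer_instance

-- ===== CLAIM (what is proved, stated in full; the proofs are below) =====
def Claim_equal_parse : Prop := ∀ (lines : List String), Dom_parse lines → Spec_parse lines (parse lines)

-- ===== LEMMAS AND PROOFS =====

lemma parse_key (lines : List String) (t : List String) : ∀ (k start : ℕ)
    (blocks : List (List (List String))), start ≤ k → lines.drop k = t →
    (fun r => r.1 ++ [r.2])
        (t.foldl stepA (blocks, ((lines.drop start).take (k - start)).map pvCharify))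
      = (fun r => r.1 ++ [(PySem.List.slice lines (some r.2) none).map pvCharify])
        ((PySem.List.enumerate t (k : Int)).foldl (stepB lines) (blocks, (start : Int))) := by
  induction t with
  | nil =>
    intro k start blocks hsk hdrop
    have hlen : lines.length ≤ k := by
      have := congrArg List.length hdrop; simp at this; omega
    have htake : (lines.drop start).take (k - start) = lines.drop start :=
      List.take_of_length_le (by simp; omega)
    simp only [List.foldl_nil, PySem.List.enumerate_nil, PySem.List.slice_from_natCast, htake]
  | cons line t' ih =>
    intro k start blocks hsk hdrop
    have hget : lines[k]? = some line := by
      have h0 : (lines.drop k)[0]? = some line := by rw [hdrop]; rfl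
      simpa [List.getElem?_drop] using h0
    have hdrop' : lines.drop (k + 1) = t' := by
      rw [← List.tail_drop, hdrop]; rfl
    rw [PySem.List.enumerate_cons]
    simp only [List.foldl_cons]
    by_cases hline : line = ""
    · have sA : stepA (blocks, ((lines.drop start).take (k - start)).map pvCharify) line
          = (blocks ++ [((lines.drop start).take (k - start)).map pvCharify], []) := by
        simp [stepA, hline, PySem.Str.len_eq]
      have sB : stepB lines (blocks, (start : Int)) ((k : Int), line)
          = (blocks ++ [((lines.drop start).take (k - start)).map pvCharify], (k : Int) + 1) := by
        simp [stepB, hline, PySem.List.slice_natCast]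
      rw [sA, sB]
      have := ih (k + 1) (k + 1) (blocks ++ [((lines.drop start).take (k - start)).map pvCharify])
        (le_refl _) hdrop'
      simpa [Nat.cast_add] using this
    · have sA : stepA (blocks, ((lines.drop start).take (k - start)).map pvCharify) line
          = (blocks, ((lines.drop start).take (k - start)).map pvCharify ++ [pvCharify line]) := by
        simp [stepA, hline, PySem.Str.len_eq, String.length_eq_zero_iff]
      have sB : stepB lines (blocks, (start : Int)) ((k : Int), line) = (blocks, (start : Int)) := by
        simp [stepB, hline]
      rw [sA, sB]
      have htake : (lines.drop start).take (k + 1 - start)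
          = (lines.drop start).take (k - start) ++ [line] := by
        have : k + 1 - start = (k - start) + 1 := by omega
        rw [this, List.take_add_one]
        have : (lines.drop start)[k - start]? = some line := by
          rw [List.getElem?_drop]
          have : start + (k - start) = k := by omega
          rw [this, hget]
        simp [this]
      have := ih (k + 1) start blocks (by omega) hdrop'
      rw [htake] at this
      simpa [Nat.cast_add, List.map_append] using this

-- ===== VERDICT (by name: the statement is the Claim_ definition above) =====
theorem parse_spec : Claim_equal_parse := by
  intro lines _
  unfold Spec_parse parse parse_alt
  simpa using parse_key lines lines 0 0 [] (le_refl 0) (by simp)
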